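-- pv_equiv track=rewrite | github.com/JakubMlocek/Introduction_to_Computer_Science | Cwiczenia4/zad14.py | czyzgodne
-- ===== SOURCE A (Python) =====
-- def czyzgodne(l1, l2):
--     iljedynek1 = 0
--     while l1 > 0:
--         if l1 % 2 == 1:
--             iljedynek1 += 1
--         l1 //= 2
--
--     iljedynek2 = 0
--     while l2 > 0:
--         if l2 % 2 == 1:
--             iljedynek2 += 1
--         l2 //= 2
--
--     return iljedynek1 == iljedynek2
-- ===== SOURCE B (Python) =====
-- def czyzgodne(l1, l2):
--     def popcount(n):
--         count = 0
--         while n > 0: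
--             n &= n - 1
--             count += 1
--         return count
--     return popcount(l1) == popcount(l2)
-- ===== Notes on version B (the rewrite author's own statement) =====
-- stated objective: alternative
-- what changed: Replaces the per-bit %2 / //2 halving loops with a popcount helper using Brian Kernighan's n &= n-1 trick, which iterates once per SET bit instead of once per bit.
import Mathlib
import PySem

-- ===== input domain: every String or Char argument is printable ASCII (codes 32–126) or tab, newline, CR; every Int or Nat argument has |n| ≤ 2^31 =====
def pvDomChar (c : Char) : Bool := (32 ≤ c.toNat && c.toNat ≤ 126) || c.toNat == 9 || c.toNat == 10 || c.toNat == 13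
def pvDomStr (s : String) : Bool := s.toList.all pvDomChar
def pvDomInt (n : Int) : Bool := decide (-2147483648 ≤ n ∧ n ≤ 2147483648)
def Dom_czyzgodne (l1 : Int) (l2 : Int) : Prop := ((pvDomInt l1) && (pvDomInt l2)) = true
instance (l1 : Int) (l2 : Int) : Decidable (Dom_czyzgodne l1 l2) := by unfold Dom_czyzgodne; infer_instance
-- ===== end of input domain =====

-- B replaces the per-bit %2 / //2 halving loops with Kernighan's n &= n-1 popcount (alternative algorithm, same result).


-- ===== PORT A =====
-- the 'while l > 0: if l % 2 == 1: c += 1; l //= 2' loop of A, carried counter c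
def czyALoop (l : Int) (c : Int) : Int :=
  if 0 < l then
    czyALoop (PySem.Int.floordiv l 2) (if PySem.Int.mod l 2 = 1 then c + 1 else c)
  else c
termination_by l.toNat
decreasing_by
  rw [PySem.Int.floordiv_eq_ediv_of_pos (by omega : (0:Int) < 2)]; omega

def czyzgodne (l1 : Int) (l2 : Int) : Bool :=
  czyALoop l1 0 == czyALoop l2 0

-- ===== PORT B =====
-- Kernighan popcount: 'count = 0; while n > 0: n &= n - 1; count += 1'
def popcountLoop (n : Int) (count : Int) : Int :=
  if 0 < n then popcountLoop (PySem.Int.band n (n - 1)) (count + 1) else count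
termination_by n.toNat
decreasing_by
  rename_i h
  rw [PySem.Int.band_of_nonneg (by omega) (by omega)]
  have hle : n.toNat &&& (n - 1).toNat ≤ (n - 1).toNat := Nat.and_le_right
  omega

def czyzgodne_alt (l1 : Int) (l2 : Int) : Bool :=
  popcountLoop l1 0 == popcountLoop l2 0

-- ===== PRECONDITION & SPEC =====
def Spec_czyzgodne (l1 : Int) (l2 : Int) (out : Bool) : Prop := out = czyzgodne_alt l1 l2
instance (l1 : Int) (l2 : Int) (out : Bool) : Decidable (Spec_czyzgodne l1 l2 out) := by unfold Spec_czyzgodne; infer_instance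

-- ===== CLAIM (what is proved, stated in full; the proofs are below) =====
def Claim_equal_czyzgodne : Prop := ∀ (l1 : Int) (l2 : Int), Dom_czyzgodne l1 l2 → Spec_czyzgodne l1 l2 (czyzgodne l1 l2)

-- ===== LEMMAS AND PROOFS =====

-- Nat-level models of the two loops
def bitsN (n : Nat) : Nat :=
  if 0 < n then n % 2 + bitsN (n / 2) else 0
termination_by n
decreasing_by omega

def kernN (n : Nat) : Nat :=
  if 0 < n then kernN (n &&& (n - 1)) + 1 else 0
termination_by n
decreasing_by exact lt_of_le_of_lt Nat.and_le_right (by omega)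

theorem land_odd_even (m : Nat) : (2 * m + 1) &&& (2 * m) = 2 * m := by
  have h := Nat.land_bit true m false m
  simpa [Nat.bit, Nat.and_self] using h

theorem land_even_pred (m : Nat) (h : 0 < m) :
    (2 * m) &&& (2 * m - 1) = 2 * (m &&& (m - 1)) := by
  have hb := Nat.land_bit false m true (m - 1)
  rw [show 2 * m - 1 = 2 * (m - 1) + 1 from by omega]
  simpa [Nat.bit] using hb

theorem kernN_two_mul : ∀ m, kernN (2 * m) = kernN m := by
  intro m
  induction m using Nat.strong_induction_on with
  | _ m ih =>
    rcases Nat.eq_zero_or_pos m with hm | hm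
    · subst hm; rfl
    · conv_lhs => rw [kernN]
      rw [if_pos (by omega), land_even_pred m hm,
          ih (m &&& (m - 1)) (lt_of_le_of_lt Nat.and_le_right (by omega))]
      conv_rhs => rw [kernN]
      rw [if_pos hm]

theorem kernN_two_mul_add_one (m : Nat) : kernN (2 * m + 1) = kernN m + 1 := by
  conv_lhs => rw [kernN]
  rw [if_pos (by omega), Nat.add_sub_cancel, land_odd_even, kernN_two_mul]

theorem kernN_eq_bitsN : ∀ n, kernN n = bitsN n := by
  intro n
  induction n using Nat.strong_induction_on with
  | _ n ih =>
    rcases Nat.eq_zero_or_pos n with hn | hn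
    · subst hn; simp [kernN, bitsN]
    · rcases Nat.even_or_odd n with ⟨m, hm⟩ | ⟨m, hm⟩
      · have hmn : n = 2 * m := by omega
        subst hmn
        rw [kernN_two_mul, ih m (by omega)]
        conv_rhs => rw [bitsN]
        rw [if_pos hn, show 2 * m / 2 = m from by omega, Nat.mul_mod_right]
        omega
      · subst hm
        rw [kernN_two_mul_add_one, ih m (by omega)]
        conv_rhs => rw [bitsN]
        rw [if_pos hn, show (2 * m + 1) % 2 = 1 from by omega,
            show (2 * m + 1) / 2 = m from by omega]
        omega

theorem czyALoop_nat : ∀ (n : Nat) (c : Int), czyALoop (↑n) c = c + ↑(bitsN n) := by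
  intro n
  induction n using Nat.strong_induction_on with
  | _ n ih =>
    intro c
    rcases Nat.eq_zero_or_pos n with hn | hn
    · subst hn; rw [czyALoop, if_neg (by omega), bitsN, if_neg (by omega)]; simp
    · have hf : PySem.Int.floordiv (↑n) 2 = ((n / 2 : Nat) : Int) := by
        rw [PySem.Int.floordiv_eq_ediv_of_pos (by omega)]; omega
      have hm : PySem.Int.mod (↑n) 2 = ((n % 2 : Nat) : Int) := by
        rw [PySem.Int.mod_eq_emod_of_pos (by omega)]; omega
      rw [czyALoop, if_pos (by exact_mod_cast hn), hm, hf, ih (n / 2) (by omega)]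
      conv_rhs => rw [bitsN]
      rw [if_pos hn]
      by_cases hpar : n % 2 = 1
      · rw [hpar]; norm_num; ring
      · rw [show n % 2 = 0 from by omega]; norm_num

theorem czyALoop_eq (l : Int) : czyALoop l 0 = ↑(bitsN l.toNat) := by
  by_cases h : 0 < l
  · conv_lhs => rw [show l = ((l.toNat : Nat) : Int) from by omega]
    rw [czyALoop_nat]; simp
  · rw [czyALoop, if_neg h, show l.toNat = 0 from by omega, bitsN, if_neg (by omega)]
    simp

theorem popcountLoop_nat : ∀ (n : Nat) (c : Int), popcountLoop (↑n) c = c + ↑(kernN n) := by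
  intro n
  induction n using Nat.strong_induction_on with
  | _ n ih =>
    intro c
    rcases Nat.eq_zero_or_pos n with hn | hn
    · subst hn; rw [popcountLoop, if_neg (by omega), kernN, if_neg (by omega)]; simp
    · rw [popcountLoop, if_pos (by exact_mod_cast hn),
          show (↑n : Int) - 1 = ((n - 1 : Nat) : Int) from by omega,
          PySem.Int.band_natCast,
          ih (n &&& (n - 1)) (lt_of_le_of_lt Nat.and_le_right (by omega))]
      conv_rhs => rw [kernN]
      rw [if_pos hn]
      push_cast; ring

theorem popcountLoop_eq (l : Int) : popcountLoop l 0 = ↑(kernN l.toNat) := by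
  by_cases h : 0 < l
  · conv_lhs => rw [show l = ((l.toNat : Nat) : Int) from by omega]
    rw [popcountLoop_nat]; simp
  · rw [popcountLoop, if_neg h, show l.toNat = 0 from by omega, kernN, if_neg (by omega)]
    simp

-- ===== VERDICT (by name: the statement is the Claim_ definition above) =====
theorem czyzgodne_spec : Claim_equal_czyzgodne := by
  intro l1 l2 _
  unfold Spec_czyzgodne czyzgodne czyzgodne_alt
  rw [czyALoop_eq, czyALoop_eq, popcountLoop_eq, popcountLoop_eq,
      kernN_eq_bitsN, kernN_eq_bitsN]
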